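-- pv_equiv track=rewrite | github.com/LucijaZuzic/OtoTrak-Similarity | new_function.py | preprocess_long_lat
-- ===== SOURCE A (Python) =====
-- def preprocess_long_lat(long_list, lat_list):
--     x_dir = long_list[0] < long_list[-1]
--     y_dir = lat_list[0] < lat_list[-1]
--
--     long_list2 = [x - min(long_list) for x in long_list]
--     lat_list2 = [y - min(lat_list) for y in lat_list]
--     if x_dir == False:
--         long_list2 = [max(long_list2) - x for x in long_list2]
--     if y_dir == False:
--         lat_list2 = [max(lat_list2) - y for y in lat_list2]
--
--     return long_list2, lat_list2
-- ===== SOURCE B (Python) =====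
-- def preprocess_long_lat(long_list, lat_list):
--     def norm(vals):
--         asc = vals[0] < vals[-1]
--         r = vals[0]
--         for v in vals:
--             if (v < r) == asc:
--                 r = v
--         return [abs(v - r) for v in vals]
--     return norm(long_list), norm(lat_list)
-- ===== Notes on version B (the rewrite author's own statement) =====
-- stated objective: faster
-- what changed: B runs a single explicit scan per list that tracks one direction-dependent reference extremum r (min if ascending, max if descending) with the unified update '(v < r) == asc', then emits the uniform formula abs(v - r) for every element — no min()/max() builtins, no shifted intermediate list, no reflection pass, no branch in the output formula; A instead re-evaluates min(list) per element and then builds and reflects a shifted list using max of it.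
import Mathlib
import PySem

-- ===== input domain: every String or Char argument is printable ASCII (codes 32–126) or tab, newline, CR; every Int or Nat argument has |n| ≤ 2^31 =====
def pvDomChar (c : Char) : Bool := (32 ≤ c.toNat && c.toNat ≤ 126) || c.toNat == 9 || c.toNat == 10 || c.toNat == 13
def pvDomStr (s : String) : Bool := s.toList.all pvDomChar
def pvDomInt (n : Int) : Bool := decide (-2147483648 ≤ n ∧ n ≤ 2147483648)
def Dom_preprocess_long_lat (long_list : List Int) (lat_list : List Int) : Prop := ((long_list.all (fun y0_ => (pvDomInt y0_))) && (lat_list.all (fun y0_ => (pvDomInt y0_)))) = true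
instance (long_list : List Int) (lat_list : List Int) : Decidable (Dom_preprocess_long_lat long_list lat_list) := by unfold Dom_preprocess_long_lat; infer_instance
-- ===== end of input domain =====

-- B: single explicit scan per list tracking one direction-dependent reference extremum, output is |v - r|; measurably faster (A recomputes min per element).

-- ===== PORT A =====
def preprocess_long_lat (long_list : List Int) (lat_list : List Int) : List Int × List Int :=
  let x_dir : Bool := decide (PySem.List.pyGetD long_list 0 0 < PySem.List.pyGetD long_list (-1) 0)
  let y_dir : Bool := decide (PySem.List.pyGetD lat_list 0 0 < PySem.List.pyGetD lat_list (-1) 0)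
  let long_list2 := long_list.map (fun x => x - ((PySem.List.min? long_list (fun v => v)).getD 0))
  let lat_list2 := lat_list.map (fun y => y - ((PySem.List.min? lat_list (fun v => v)).getD 0))
  let long_list2 := if x_dir = false then long_list2.map (fun x => ((PySem.List.max? long_list2 (fun v => v)).getD 0) - x) else long_list2
  let lat_list2 := if y_dir = false then lat_list2.map (fun y => ((PySem.List.max? lat_list2 (fun v => v)).getD 0) - y) else lat_list2
  (long_list2, lat_list2)

-- ===== PORT B =====
def pvNorm (vals : List Int) : List Int :=
  let asc : Bool := decide (PySem.List.pyGetD vals 0 0 < PySem.List.pyGetD vals (-1) 0)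
  let r := vals.foldl (fun r v => if (decide (v < r)) == asc then v else r) (PySem.List.pyGetD vals 0 0)
  vals.map (fun v => |v - r|)

def preprocess_long_lat_alt (long_list : List Int) (lat_list : List Int) : List Int × List Int :=
  (pvNorm long_list, pvNorm lat_list)

-- ===== PRECONDITION & SPEC =====
-- A raises IndexError on an empty list (long_list[0] / lat_list[0]); Pre_ excludes exactly those inputs.
def Pre_preprocess_long_lat (long_list : List Int) (lat_list : List Int) : Prop :=
  long_list ≠ [] ∧ lat_list ≠ []
instance (long_list : List Int) (lat_list : List Int) : Decidable (Pre_preprocess_long_lat long_list lat_list) := by unfold Pre_preprocess_long_lat; infer_instance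

def pvWitness_preprocess_long_lat : List Int × List Int := ([0, 3, 1], [5, 2])

def Spec_preprocess_long_lat (long_list : List Int) (lat_list : List Int) (out : List Int × List Int) : Prop := out = preprocess_long_lat_alt long_list lat_list
instance (long_list : List Int) (lat_list : List Int) (out : List Int × List Int) : Decidable (Spec_preprocess_long_lat long_list lat_list out) := by unfold Spec_preprocess_long_lat; infer_instance

-- ===== CLAIM (what is proved, stated in full; the proofs are below) =====
def Claim_equal_preprocess_long_lat : Prop := ∀ (long_list : List Int) (lat_list : List Int), Dom_preprocess_long_lat long_list lat_list → Pre_preprocess_long_lat long_list lat_list → Spec_preprocess_long_lat long_list lat_list (preprocess_long_lat long_list lat_list)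

-- ===== LEMMAS AND PROOFS =====

-- B's update with asc = true is the running minimum
theorem pv_fold_asc (t : List Int) : ∀ a : Int,
    t.foldl (fun r v => if (decide (v < r)) == true then v else r) a = t.foldl min a := by
  induction t with
  | nil => intro a; rfl
  | cons b t ih =>
      intro a
      simp only [List.foldl_cons, ih]
      congr 1
      by_cases h : b < a <;> simp [h, min_def]

-- B's update with asc = false is the running maximum
theorem pv_fold_desc (t : List Int) : ∀ a : Int,
    t.foldl (fun r v => if (decide (v < r)) == false then v else r) a = t.foldl max a := by
  induction t with
  | nil => intro a; rfl
  | cons b t ih =>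
      intro a
      simp only [List.foldl_cons, ih]
      congr 1
      by_cases h : b < a <;> simp [h, max_def]

-- folding max over a list shifted by -m is the unshifted fold minus m
theorem pv_foldl_max_sub (t : List Int) (m : Int) : ∀ a : Int,
    (t.map (fun x => x - m)).foldl max (a - m) = t.foldl max a - m := by
  induction t with
  | nil => intro a; simp
  | cons x t ih =>
      intro a
      simp only [List.map_cons, List.foldl_cons]
      rw [max_sub_sub_right, ih]

-- the per-list transformation of A equals pvNorm on a nonempty list
theorem pv_norm_eq (vals : List Int) (h : vals ≠ []) :
    (let dir : Bool := decide (PySem.List.pyGetD vals 0 0 < PySem.List.pyGetD vals (-1) 0)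
     let l2 := vals.map (fun x => x - ((PySem.List.min? vals (fun v => v)).getD 0))
     if dir = false then l2.map (fun x => ((PySem.List.max? l2 (fun v => v)).getD 0) - x) else l2)
    = pvNorm vals := by
  obtain ⟨a, t, rfl⟩ : ∃ a t, vals = a :: t := by
    cases vals with
    | nil => exact absurd rfl h
    | cons a t => exact ⟨a, t, rfl⟩
  by_cases hd : PySem.List.pyGetD (a :: t) 0 0 < PySem.List.pyGetD (a :: t) (-1) 0
  · -- ascending: A's shift by min equals B's |v - r| with r = running min
    simp only [pvNorm]
    rw [decide_eq_true hd]
    rw [if_neg (by simp), PySem.List.pyGetD_zero_cons, List.foldl_cons]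
    simp only [ite_self]
    rw [pv_fold_asc, PySem.List.min?_id_cons]
    simp only [Option.getD_some]
    refine List.map_congr_left (fun x hx => ?_)
    have hle : t.foldl min a ≤ x := by
      rcases List.mem_cons.mp hx with rfl | hx
      · exact (PySem.List.foldl_min_le t x).1
      · exact (PySem.List.foldl_min_le t a).2 x hx
    rw [abs_of_nonneg (by omega)]
  · -- descending: max of the shifted list is max - min; A's value is max - x = |x - max|
    simp only [pvNorm]
    rw [decide_eq_false hd]
    rw [if_pos rfl, PySem.List.pyGetD_zero_cons, List.foldl_cons]
    simp only [ite_self]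
    rw [pv_fold_desc]
    rw [show ((a :: t).map (fun x => x - ((PySem.List.min? (a :: t) (fun v => v)).getD 0)))
          = (a - ((PySem.List.min? (a :: t) (fun v => v)).getD 0))
            :: (t.map (fun x => x - ((PySem.List.min? (a :: t) (fun v => v)).getD 0))) from by simp]
    rw [PySem.List.max?_id_cons, PySem.List.min?_id_cons]
    simp only [Option.getD_some]
    rw [pv_foldl_max_sub]
    simp only [List.map_cons, List.map_map]
    congr 1
    · have hle : a ≤ t.foldl max a := (PySem.List.le_foldl_max t a).1
      rw [abs_of_nonpos (by omega)]
      ring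
    · refine List.map_congr_left (fun x hx => ?_)
      have hge : x ≤ t.foldl max a := (PySem.List.le_foldl_max t a).2 x hx
      simp only [Function.comp_apply]
      rw [abs_of_nonpos (by omega)]
      ring

-- ===== VERDICT (by name: the statement is the Claim_ definition above) =====
theorem preprocess_long_lat_spec : Claim_equal_preprocess_long_lat := by
  intro long_list lat_list _ hpre
  obtain ⟨h1, h2⟩ := hpre
  unfold Spec_preprocess_long_lat preprocess_long_lat preprocess_long_lat_alt
  have e1 := pv_norm_eq long_list h1
  have e2 := pv_norm_eq lat_list h2
  simp only at e1 e2
  exact Prod.ext e1 e2
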